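-- pv_equiv track=rewrite | github.com/professor-icebear/Maverick | maverick/core/outs.py | _get_straight_sequences
-- ===== SOURCE A (Python) =====
-- from typing import List, Set, Dict, Tuple, Counter as TypeCounter
--
-- def _get_straight_sequences(ranks: List[int]) -> List[List[int]]:
--     """Find all possible straight sequences in the given ranks."""
--     sequences = []
--     ranks = sorted(set(ranks))  # Remove duplicates and sort
--
--     # Handle Ace-low straight possibility
--     if 14 in ranks:  # If we have an Ace
--         ranks.append(1)  # Add it as a low Ace
--
--     # Find all sequences of consecutive cards
--     current_seq = [ranks[0]]
--     for i in range(1, len(ranks)):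
--         if ranks[i] == current_seq[-1] + 1:
--             current_seq.append(ranks[i])
--         else:
--             if len(current_seq) >= 3:  # Only keep sequences of 3+ cards
--                 sequences.append(current_seq)
--             current_seq = [ranks[i]]
--
--     if len(current_seq) >= 3:
--         sequences.append(current_seq)
--
--     return sequences
-- ===== SOURCE B (Python) =====
-- def _get_straight_sequences(ranks):
--     """Find all possible straight sequences in the given ranks."""
--     s = set(ranks)
--     # run starts: values whose predecessor is absent; walk each run upward by membership
--     starts = sorted(v for v in s if v - 1 not in s)
--     sequences = []
--     for v in starts:
--         run = []
--         w = v
--         while w in s: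
--             run.append(w)
--             w += 1
--         if len(run) >= 3:
--             sequences.append(run)
--     return sequences
-- ===== Notes on version B (the rewrite author's own statement) =====
-- stated objective: alternative
-- what changed: B replaces A's sort-then-linear-scan with a current_seq accumulator (and A's ace-low append of 1, which provably never changes the output) by the hash-set run-start algorithm: build a set, take the values whose predecessor is absent as run starts, sort only those, and walk each run upward by set membership, keeping runs of length >= 3.
import Mathlib
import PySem

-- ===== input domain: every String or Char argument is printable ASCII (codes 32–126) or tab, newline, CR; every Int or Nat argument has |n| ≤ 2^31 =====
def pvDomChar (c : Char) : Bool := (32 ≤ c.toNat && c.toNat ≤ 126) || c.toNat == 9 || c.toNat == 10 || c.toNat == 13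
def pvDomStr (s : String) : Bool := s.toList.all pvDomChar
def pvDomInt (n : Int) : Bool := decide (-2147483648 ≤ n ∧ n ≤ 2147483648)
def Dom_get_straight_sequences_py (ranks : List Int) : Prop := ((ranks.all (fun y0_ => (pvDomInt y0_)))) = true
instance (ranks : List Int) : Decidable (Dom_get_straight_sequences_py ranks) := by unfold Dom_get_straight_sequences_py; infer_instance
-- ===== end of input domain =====

-- B replaces A's scan over the sorted values by the set-based run-start algorithm (find values whose
-- predecessor is absent, walk each run upward by membership), dropping A's ace-low append of 1,
-- which provably never changes the output; objective: alternative.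

-- ===== PORT A =====
-- loop body of A: extend current_seq on adjacency, otherwise flush it (if length >= 3) and restart
def pvStepA (st : List (List Int) × List Int) (x : Int) : List (List Int) × List Int :=
  if x = PySem.List.pyGetD st.2 (-1) 0 + 1 then
    (st.1, st.2 ++ [x])
  else
    ((if 3 ≤ st.2.length then st.1 ++ [st.2] else st.1), [x])

def get_straight_sequences_py (ranks : List Int) : List (List Int) :=
  let sequences : List (List Int) := []
  let ranks := PySem.List.sorted (PySem.Set.ofList ranks) (fun x => x) false
  let ranks := if (14 : Int) ∈ ranks then ranks ++ [(1 : Int)] else ranks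
  match PySem.List.pyGet? ranks 0 with
  | none => []  -- ranks[0] raises IndexError on empty input; excluded by Pre_
  | some r0 =>
    let st := (PySem.List.pyRange 1 (ranks.length : Int) 1).foldl
      (fun st i => pvStepA st (PySem.List.pyGetD ranks i 0)) (sequences, [r0])
    if 3 ≤ st.2.length then st.1 ++ [st.2] else st.1

-- ===== PORT B =====
-- B's inner while-loop: walk the run upward while the value is in the set; the fuel |s| bounds
-- the iteration count (a run of distinct members of s has at most |s| elements)
def pvWalk (s : List Int) : Int → Nat → List Int
  | _, 0 => []
  | w, n+1 => if w ∈ s then w :: pvWalk s (w+1) n else []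

def get_straight_sequences_py_alt (ranks : List Int) : List (List Int) :=
  let s := PySem.Set.ofList ranks
  let starts := PySem.List.sorted (s.filter (fun v => !(decide ((v-1) ∈ s)))) (fun x => x) false
  starts.foldl (fun sequences v =>
    let run := pvWalk s v s.length
    if 3 ≤ run.length then sequences ++ [run] else sequences) []

-- ===== PRECONDITION & SPEC =====
-- Pre_ excludes only the empty list, on which A raises IndexError (ranks[0]).
def Pre_get_straight_sequences_py (ranks : List Int) : Prop := ranks ≠ []
instance (ranks : List Int) : Decidable (Pre_get_straight_sequences_py ranks) := by unfold Pre_get_straight_sequences_py; infer_instance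
def pvWitness_get_straight_sequences_py : List Int := [2, 3, 4, 14]

def Spec_get_straight_sequences_py (ranks : List Int) (out : List (List Int)) : Prop := out = get_straight_sequences_py_alt ranks
instance (ranks : List Int) (out : List (List Int)) : Decidable (Spec_get_straight_sequences_py ranks out) := by unfold Spec_get_straight_sequences_py; infer_instance

-- ===== CLAIM (what is proved, stated in full; the proofs are below) =====
def Claim_equal_get_straight_sequences_py : Prop := ∀ (ranks : List Int), Dom_get_straight_sequences_py ranks → Pre_get_straight_sequences_py ranks → Spec_get_straight_sequences_py ranks (get_straight_sequences_py ranks)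
-- ===== LEMMAS AND PROOFS =====

-- the filter predicate both programs apply to a finished run
def pvKeep (r : List Int) : Bool := decide (3 ≤ r.length)

-- front-to-back view of the maximal-run decomposition: prepend v, merging into the first run when it starts at v+1
def pvChunkStep (v : Int) (runs : List (List Int)) : List (List Int) :=
  match runs with
  | (w :: ws) :: rest => if w = v + 1 then (v :: w :: ws) :: rest else [v] :: (w :: ws) :: rest
  | _ => [v] :: runs

def pvChunks (l : List Int) : List (List Int) := l.foldr pvChunkStep []

-- A's finalization: flush current_seq if it has length >= 3
def pvFin (st : List (List Int) × List Int) : List (List Int) :=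
  if 3 ≤ st.2.length then st.1 ++ [st.2] else st.1

-- attach a pending (nonempty) current run `c` in front of an already-built run list
def pvGlue (c : List Int) (chs : List (List Int)) : List (List Int) :=
  match chs with
  | (w :: ws) :: rest => if w = PySem.List.pyGetD c (-1) 0 + 1 then (c ++ w :: ws) :: rest else c :: (w :: ws) :: rest
  | _ => c :: chs

theorem pvGlue_cons_head (c : List Int) (x : Int) (r : List Int) (rest : List (List Int)) :
    pvGlue c ((x :: r) :: rest)
      = if x = PySem.List.pyGetD c (-1) 0 + 1 then (c ++ x :: r) :: rest else c :: (x :: r) :: rest := rfl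

theorem pvChunkStep_cons (x w : Int) (ws : List Int) (rest : List (List Int)) :
    pvChunkStep x ((w :: ws) :: rest)
      = if w = x + 1 then (x :: w :: ws) :: rest else [x] :: (w :: ws) :: rest := rfl

theorem pvLastD_append (c : List Int) (x : Int) : PySem.List.pyGetD (c ++ [x]) (-1) 0 = x :=
  PySem.List.pyGetD_neg_one_append_singleton c x 0

theorem pvLastD_singleton (x : Int) : PySem.List.pyGetD [x] (-1) 0 = x := by
  simp [PySem.List.pyGetD, PySem.List.pyGet?_neg_one]

theorem pvGlue_singleton (x : Int) (chs : List (List Int)) : pvGlue [x] chs = pvChunkStep x chs := by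
  match chs with
  | [] => rfl
  | [] :: rest => rfl
  | (w :: ws) :: rest =>
      rw [pvGlue_cons_head, pvChunkStep_cons, pvLastD_singleton]
      rfl

theorem pvGlue_merge (c : List Int) (x : Int) (chs : List (List Int))
    (h : x = PySem.List.pyGetD c (-1) 0 + 1) :
    pvGlue c (pvChunkStep x chs) = pvGlue (c ++ [x]) chs := by
  match chs with
  | [] =>
      show pvGlue c ([x] :: []) = _
      rw [pvGlue_cons_head, if_pos h]
      rfl
  | [] :: rest =>
      show pvGlue c ([x] :: [] :: rest) = _
      rw [pvGlue_cons_head, if_pos h]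
      rfl
  | (w :: ws) :: rest =>
      rw [pvChunkStep_cons]
      by_cases hw : w = x + 1
      · rw [if_pos hw, pvGlue_cons_head, if_pos h, pvGlue_cons_head, pvLastD_append, if_pos hw]
        simp
      · rw [if_neg hw, pvGlue_cons_head, if_pos h, pvGlue_cons_head, pvLastD_append, if_neg hw]

theorem pvGlue_skip (c : List Int) (x : Int) (chs : List (List Int))
    (h : ¬ x = PySem.List.pyGetD c (-1) 0 + 1) :
    pvGlue c (pvChunkStep x chs) = c :: pvChunkStep x chs := by
  match chs with
  | [] =>
      show pvGlue c ([x] :: []) = _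
      rw [pvGlue_cons_head, if_neg h]
      rfl
  | [] :: rest =>
      show pvGlue c ([x] :: [] :: rest) = _
      rw [pvGlue_cons_head, if_neg h]
      rfl
  | (w :: ws) :: rest =>
      rw [pvChunkStep_cons]
      by_cases hw : w = x + 1
      · rw [if_pos hw, pvGlue_cons_head, if_neg h]
      · rw [if_neg hw, pvGlue_cons_head, if_neg h]

theorem pvNoNil (l : List Int) : [] ∉ pvChunks l := by
  induction l with
  | nil => simp [pvChunks]
  | cons x xs ih =>
      unfold pvChunks at *
      rw [List.foldr_cons]
      generalize h : xs.foldr pvChunkStep [] = chs at ih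
      match chs with
      | [] => simp [pvChunkStep]
      | [] :: rest => exact absurd List.mem_cons_self ih
      | (w :: ws) :: rest =>
          have ih' : [] ∉ rest := fun hm => ih (List.mem_cons_of_mem _ hm)
          rw [pvChunkStep_cons]
          by_cases hw : w = x + 1 <;> simp [hw, ih']

-- main loop correspondence: A's left scan with pending run `cur` equals the chunk decomposition glued to `cur`
theorem pvMain (l : List Int) : ∀ (seqs : List (List Int)) (cur : List Int),
    pvFin (l.foldl pvStepA (seqs, cur)) = seqs ++ (pvGlue cur (pvChunks l)).filter pvKeep := by
  induction l with
  | nil =>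
      intro seqs cur
      simp only [pvChunks, List.foldl_nil, List.foldr_nil, pvGlue, pvFin]
      by_cases h : 3 ≤ cur.length <;> simp [h, List.filter, pvKeep]
  | cons x xs ih =>
      intro seqs cur
      simp only [pvChunks, List.foldl_cons, List.foldr_cons] at *
      by_cases h : x = PySem.List.pyGetD cur (-1) 0 + 1
      · have hstep : pvStepA (seqs, cur) x = (seqs, cur ++ [x]) := by
          simp [pvStepA, h]
        rw [hstep, ih, pvGlue_merge cur x _ h]
      · have hstep : pvStepA (seqs, cur) x =
            ((if 3 ≤ cur.length then seqs ++ [cur] else seqs), [x]) := by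
          simp [pvStepA, h]
        rw [hstep, ih, pvGlue_skip cur x _ h, pvGlue_singleton]
        by_cases h3 : 3 ≤ cur.length <;> simp [h3, pvKeep]

theorem pvStepA_else (st : List (List Int) × List Int) (x : Int)
    (h : ¬ x = PySem.List.pyGetD st.2 (-1) 0 + 1) : pvStepA st x = (pvFin st, [x]) := by
  unfold pvStepA pvFin
  rw [if_neg h]

-- the pending run always ends with the last element processed
theorem pvStepA_snd_lastD (st : List (List Int) × List Int) (x : Int) :
    PySem.List.pyGetD (pvStepA st x).2 (-1) 0 = x := by
  unfold pvStepA
  split_ifs with h'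
  · exact pvLastD_append st.2 x
  all_goals exact pvLastD_singleton x

theorem pvLastD_foldl (l : List Int) : ∀ (seqs : List (List Int)) (cur : List Int),
    PySem.List.pyGetD ((l.foldl pvStepA (seqs, cur)).2) (-1) 0 = l.getLastD (PySem.List.pyGetD cur (-1) 0) := by
  induction l with
  | nil => intro seqs cur; rfl
  | cons x xs ih =>
      intro seqs cur
      simp only [List.foldl_cons, List.getLastD_cons]
      have := ih (pvStepA (seqs, cur) x).1 (pvStepA (seqs, cur) x).2
      rw [Prod.mk.eta] at this
      rw [this, pvStepA_snd_lastD]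

-- in a strictly increasing list every member is at most the last element
theorem pvMem_le_getLastD (l : List Int) (hp : l.Pairwise (· < ·)) (a : Int) (ha : a ∈ l) (d : Int) :
    a ≤ l.getLastD d := by
  induction l generalizing d with
  | nil => cases ha
  | cons b t ih =>
      rw [List.getLastD_cons]
      rcases List.pairwise_cons.mp hp with ⟨hb, ht⟩
      rcases List.mem_cons.mp ha with rfl | hat
      · cases t with
        | nil => simp
        | cons c t' =>
            rw [List.getLastD_cons]
            have hmem : (c :: t').getLastD a ∈ a :: c :: t' := List.getLastD_mem_cons
            rw [List.getLastD_cons] at hmem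
            rcases List.mem_cons.mp hmem with he | hm
            · exact he.ge
            · exact le_of_lt (hb _ hm)
      · exact ih ht hat b

-- A equals the filtered chunk decomposition of the sorted distinct values
theorem pvA_eq_chunks (ranks : List Int) (hpre : ranks ≠ []) :
    get_straight_sequences_py ranks
      = (pvChunks (PySem.List.sorted (PySem.Set.ofList ranks) (fun x => x) false)).filter pvKeep := by
  unfold get_straight_sequences_py
  set vals := PySem.List.sorted (PySem.Set.ofList ranks) (fun x => x) false with hvals
  have hvne : vals ≠ [] := by
    rw [hvals, Ne, PySem.List.sorted_eq_nil_iff]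
    intro hof
    cases ranks with
    | nil => exact hpre rfl
    | cons r rs =>
        have hmem : r ∈ PySem.Set.ofList (r :: rs) := by
          simp [PySem.Set.mem_ofList]
        rw [hof] at hmem; cases hmem
  obtain ⟨v0, t, hvt⟩ := List.exists_cons_of_ne_nil hvne
  have hpair : vals.Pairwise (· < ·) := by
    rw [hvals]; exact PySem.List.sorted_ofList_pairwise_lt ranks
  have hB : (pvChunks (v0 :: t)).filter pvKeep
      = pvFin (t.foldl pvStepA ([], [v0])) := by
    rw [pvMain t [] [v0], pvGlue_singleton]
    simp [pvChunks, List.foldr_cons]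
  by_cases hace : (14 : Int) ∈ vals
  · -- ace branch: the appended 1 closes the last run and forms a discarded singleton
    simp only [if_pos hace]
    rw [hvt, List.cons_append]
    simp only [PySem.List.pyGet?_zero_cons]
    rw [PySem.List.foldl_pyRange_pyGetD' (v0 :: (t ++ [(1 : Int)])) 0 pvStepA
      (([] : List (List Int)), [v0]) (by norm_num : (0 : Int) ≤ 1)]
    simp only [Int.toNat_one, List.drop_one, List.tail_cons]
    show pvFin (List.foldl pvStepA ([], [v0]) (t ++ [(1 : Int)]))
        = (pvChunks (v0 :: t)).filter pvKeep
    rw [List.foldl_append, List.foldl_cons, List.foldl_nil]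
    -- the pending run ends in the last (largest) element of vals, which is ≥ 14
    have hlast : PySem.List.pyGetD ((t.foldl pvStepA ([], [v0])).2) (-1) 0 = t.getLastD v0 := by
      rw [pvLastD_foldl t [] [v0], pvLastD_singleton]
    have h14 : (14 : Int) ≤ t.getLastD v0 := by
      have := pvMem_le_getLastD vals hpair 14 hace 0
      rw [hvt, List.getLastD_cons] at this
      exact this
    have hne1 : ¬ ((1 : Int) = PySem.List.pyGetD ((t.foldl pvStepA ([], [v0])).2) (-1) 0 + 1) := by
      rw [hlast]; omega
    rw [pvStepA_else _ 1 hne1]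
    have h1 : pvFin (pvFin (t.foldl pvStepA ([], [v0])), [(1 : Int)])
        = pvFin (t.foldl pvStepA ([], [v0])) := by
      simp [pvFin]
    rw [h1]
    exact hB.symm
  · -- no ace: identical scans
    simp only [if_neg hace]
    rw [hvt]
    simp only [PySem.List.pyGet?_zero_cons]
    rw [PySem.List.foldl_pyRange_pyGetD' (v0 :: t) 0 pvStepA
      (([] : List (List Int)), [v0]) (by norm_num : (0 : Int) ≤ 1)]
    simp only [Int.toNat_one, List.drop_one, List.tail_cons]
    show pvFin (List.foldl pvStepA ([], [v0]) t)
        = (pvChunks (v0 :: t)).filter pvKeep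
    exact hB.symm

-- ===== B-side lemmas =====

theorem pvChunks_cons (x : Int) (l : List Int) : pvChunks (x :: l) = pvChunkStep x (pvChunks l) := rfl

theorem pvChunks_flatten (l : List Int) : (pvChunks l).flatten = l := by
  induction l with
  | nil => rfl
  | cons x xs ih =>
      rw [pvChunks_cons]
      generalize h : pvChunks xs = chs at ih
      match chs with
      | [] => simp at ih; simp [pvChunkStep, ih]
      | [] :: rest => simp [pvChunkStep, ← ih]
      | (w :: ws) :: rest =>
          unfold pvChunkStep
          by_cases hw : w = x + 1 <;> simp [hw, ← ih]

theorem pvChunks_chain (l : List Int) : ∀ c ∈ pvChunks l, List.IsChain (fun a b => b = a + 1) c := by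
  induction l with
  | nil => simp [pvChunks]
  | cons x xs ih =>
      rw [pvChunks_cons]
      generalize h : pvChunks xs = chs at ih
      match chs with
      | [] => intro c hc; simp [pvChunkStep] at hc; simp [hc]
      | [] :: rest =>
          intro c hc
          simp only [pvChunkStep] at hc
          rcases List.mem_cons.mp hc with rfl | hc'
          · simp
          · exact ih c hc'
      | (w :: ws) :: rest =>
          intro c hc
          rw [show pvChunkStep x ((w::ws)::rest) = if w = x + 1 then (x :: w :: ws) :: rest else [x] :: (w :: ws) :: rest from rfl] at hc
          by_cases hw : w = x + 1
          · rw [if_pos hw] at hc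
            rcases List.mem_cons.mp hc with rfl | hc'
            · have := ih (w :: ws) List.mem_cons_self
              exact List.IsChain.cons_cons hw this
            · exact ih c (List.mem_cons_of_mem _ hc')
          · rw [if_neg hw] at hc
            rcases List.mem_cons.mp hc with rfl | hc'
            · simp
            · exact ih c hc'

theorem pvMemChunks (l : List Int) (c : List Int) (hc : c ∈ pvChunks l) {x : Int} (hx : x ∈ c) : x ∈ l := by
  rw [← pvChunks_flatten l]
  exact List.mem_flatten.mpr ⟨c, hc, hx⟩

theorem pvHeadChunks (l : List Int) (w : Int) (ws : List Int) (rest : List (List Int))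
    (h : pvChunks l = (w :: ws) :: rest) : l = w :: (ws ++ rest.flatten) := by
  have := pvChunks_flatten l
  rw [h] at this
  simpa using this.symm

theorem pvGetLastD_cons_cons (a b : Int) (t : List Int) (d d' : Int) :
    (a :: b :: t).getLastD d = (b :: t).getLastD d' := by
  have h := List.getLast?_eq_some_getLast (l := b :: t) (by simp)
  rw [List.getLastD_cons, List.getLastD_eq_getLast?, List.getLastD_eq_getLast?, h]
  rfl

theorem pvLastD_mem (c : List Int) (hne : c ≠ []) : c.getLastD 0 ∈ c := by
  match c with
  | a :: t =>
      rw [List.getLastD_cons]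
      exact List.getLastD_mem_cons

theorem pvChunks_max (l : List Int) (hp : l.Pairwise (· < ·)) :
    ∀ c ∈ pvChunks l, (c.getLastD 0) + 1 ∉ l := by
  induction l with
  | nil => simp [pvChunks]
  | cons x xs ih =>
      rcases List.pairwise_cons.mp hp with ⟨hgt, hxs⟩
      have ih' := ih hxs
      have hOld : ∀ c' ∈ pvChunks xs, (c'.getLastD 0) + 1 ∉ x :: xs := by
        intro c' hc' hmem
        have hne : c' ≠ [] := fun he => pvNoNil xs (he ▸ hc')
        have hlm : c'.getLastD 0 ∈ xs := pvMemChunks xs c' hc' (pvLastD_mem c' hne)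
        have hxl : x < c'.getLastD 0 := hgt _ hlm
        rcases List.mem_cons.mp hmem with he | hm
        · omega
        · exact ih' c' hc' hm
      rw [pvChunks_cons]
      generalize h : pvChunks xs = chs at ih' hOld
      match chs with
      | [] =>
          have hxsnil : xs = [] := by
            have := pvChunks_flatten xs; rw [h] at this; simpa using this.symm
          intro c hc
          simp [pvChunkStep] at hc
          subst hc hxsnil
          simp
      | [] :: rest => exact absurd (h ▸ List.mem_cons_self) (pvNoNil xs)
      | (w :: ws) :: rest =>
          have hhead : xs = w :: (ws ++ rest.flatten) := pvHeadChunks xs w ws rest h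
          have hwle : ∀ y ∈ xs, w ≤ y := by
            intro y hy
            rw [hhead] at hy hxs
            rcases List.mem_cons.mp hy with rfl | hm
            · exact le_refl y
            · exact le_of_lt ((List.pairwise_cons.mp hxs).1 _ hm)
          intro c hc
          rw [show pvChunkStep x ((w::ws)::rest) = if w = x + 1 then (x :: w :: ws) :: rest else [x] :: (w :: ws) :: rest from rfl] at hc
          by_cases hw : w = x + 1
          · rw [if_pos hw] at hc
            rcases List.mem_cons.mp hc with rfl | hc'
            · rw [pvGetLastD_cons_cons x w ws 0 0]
              exact hOld (w :: ws) List.mem_cons_self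
            · exact hOld c (List.mem_cons_of_mem _ hc')
          · rw [if_neg hw] at hc
            rcases List.mem_cons.mp hc with rfl | hc'
            · simp only [List.getLastD_cons, List.getLastD_nil]
              intro hmem
              rcases List.mem_cons.mp hmem with he | hm
              · omega
              · have hwx : x < w := hgt _ (hhead ▸ List.mem_cons_self)
                have := hwle _ hm
                omega
            · exact hOld c hc'

theorem pvChunks_heads (l : List Int) (hp : l.Pairwise (· < ·)) :
    l.filter (fun v => !(decide ((v-1) ∈ l))) = (pvChunks l).map (fun c => c.headD 0) := by
  induction l with
  | nil => rfl
  | cons x xs ih =>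
      rcases List.pairwise_cons.mp hp with ⟨hgt, hxs⟩
      have ih' := ih hxs
      have hkeepx : (!(decide ((x-1) ∈ (x :: xs)))) = true := by
        simp only [Bool.not_eq_true', decide_eq_false_iff_not, List.mem_cons]
        rintro (he | hm)
        · omega
        · have := hgt _ hm; omega
      rw [List.filter_cons_of_pos (p := fun v : Int => !(decide ((v-1) ∈ (x :: xs)))) hkeepx]
      have hpt : (fun v : Int => (!(decide ((v-1) ∈ (x :: xs)))))
          = (fun v : Int => ((!(decide (v = x+1))) && (!(decide ((v-1) ∈ xs))))) := by
        funext v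
        have hiff : (v - 1 = x) ↔ (v = x + 1) := by omega
        by_cases h1 : v - 1 ∈ xs <;> by_cases h2 : v = x + 1 <;>
          simp [List.mem_cons, hiff, h1, h2]
      rw [hpt, ← List.filter_filter, ih', pvChunks_cons]
      generalize h : pvChunks xs = chs
      have hnn : [] ∉ chs := h ▸ pvNoNil xs
      match chs with
      | [] => rfl
      | [] :: rest => exact absurd List.mem_cons_self hnn
      | (w :: ws) :: rest =>
          have hhead : xs = w :: (ws ++ rest.flatten) := pvHeadChunks xs w ws rest h
          have hrest_gt : ∀ y ∈ rest.flatten, w < y := by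
            intro y hy
            rw [hhead] at hxs
            exact (List.pairwise_cons.mp hxs).1 _ (List.mem_append_right _ hy)
          have hheads_gt : ∀ a ∈ rest.map (fun c => c.headD 0), w < a := by
            intro a ha
            rcases List.mem_map.mp ha with ⟨c, hc, rfl⟩
            have hcne : c ≠ [] := fun he => hnn (he ▸ List.mem_cons_of_mem _ hc)
            obtain ⟨a0, t0, rfl⟩ := List.exists_cons_of_ne_nil hcne
            have ha0 : a0 ∈ rest.flatten := List.mem_flatten.mpr ⟨_, hc, List.mem_cons_self⟩
            simpa using hrest_gt _ ha0
          have hwx : x < w := hgt _ (hhead ▸ List.mem_cons_self)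
          rw [show ((w :: ws) :: rest).map (fun c => c.headD 0) = w :: rest.map (fun c => c.headD 0) from rfl]
          rw [show pvChunkStep x ((w::ws)::rest) = if w = x + 1 then (x :: w :: ws) :: rest else [x] :: (w :: ws) :: rest from rfl]
          by_cases hw : w = x + 1
          · rw [if_pos hw]
            rw [List.filter_cons_of_neg (by simp [hw])]
            have hrest : (rest.map (fun c => c.headD 0)).filter (fun v => !(decide (v = x+1))) = rest.map (fun c => c.headD 0) := by
              apply List.filter_eq_self.mpr
              intro a ha
              have := hheads_gt a ha
              simp only [Bool.not_eq_true', decide_eq_false_iff_not]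
              omega
            rw [hrest]
            rfl
          · rw [if_neg hw]
            have hall : (w :: rest.map (fun c => c.headD 0)).filter (fun v => !(decide (v = x+1))) = w :: rest.map (fun c => c.headD 0) := by
              apply List.filter_eq_self.mpr
              intro a ha
              rcases List.mem_cons.mp ha with rfl | hm
              · simp only [Bool.not_eq_true', decide_eq_false_iff_not]
                omega
              · have := hheads_gt a hm
                simp only [Bool.not_eq_true', decide_eq_false_iff_not]
                omega
            rw [hall]
            rfl

theorem pvWalk_not_mem (s : List Int) (v : Int) (f : Nat) (h : v ∉ s) : pvWalk s v f = [] := by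
  cases f <;> simp [pvWalk, h]

theorem pvWalk_run (s : List Int) (c : List Int) (hne : c ≠ [])
    (hch : List.IsChain (fun a b => b = a + 1) c) (hmem : ∀ x ∈ c, x ∈ s)
    (hmax : (c.getLastD 0) + 1 ∉ s) : ∀ f, c.length ≤ f → pvWalk s (c.headD 0) f = c := by
  induction c with
  | nil => exact absurd rfl hne
  | cons a t ih =>
      intro f hf
      match t, f with
      | [], n+1 =>
          simp only [List.headD_cons, pvWalk, if_pos (hmem a List.mem_cons_self)]
          rw [pvWalk_not_mem s (a+1) n (by simpa [List.getLastD_cons] using hmax)]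
      | b :: t', n+1 =>
          rcases List.isChain_cons_cons.mp hch with ⟨hab, hch'⟩
          simp only [List.headD_cons, pvWalk, if_pos (hmem a List.mem_cons_self)]
          have htail := ih (by simp) hch'
            (fun x hx => hmem x (List.mem_cons_of_mem _ hx))
            (by rwa [pvGetLastD_cons_cons a b t' 0 0] at hmax) n
            (by simpa using Nat.le_of_succ_le_succ hf)
          rw [show a + 1 = b by omega, show b = (b :: t').headD 0 from rfl, htail]
          rfl

theorem pvWalk_congr (s l : List Int) (hm : ∀ x : Int, x ∈ s ↔ x ∈ l) :
    ∀ (f : Nat) (v : Int), pvWalk s v f = pvWalk l v f := by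
  intro f
  induction f with
  | zero => intro v; rfl
  | succ n ih =>
      intro v
      simp only [pvWalk, hm v, ih]

-- B equals the filtered chunk decomposition of the sorted distinct values
theorem pvB_eq_chunks (ranks : List Int) :
    get_straight_sequences_py_alt ranks
      = (pvChunks (PySem.List.sorted (PySem.Set.ofList ranks) (fun x => x) false)).filter pvKeep := by
  simp only [get_straight_sequences_py_alt]
  set sl := PySem.Set.ofList ranks with hsl
  set vals := PySem.List.sorted sl (fun x => x) false with hvals
  have hperm : vals.Perm sl := PySem.List.sorted_perm _ _ _
  have hmemv : ∀ x : Int, x ∈ vals ↔ x ∈ sl := fun x => PySem.List.mem_sorted _ _ _ _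
  have hpair : vals.Pairwise (· < ·) := PySem.List.sorted_ofList_pairwise_lt ranks
  have hlen : sl.length = vals.length := hperm.length_eq.symm
  have hfun : (fun (sequences : List (List Int)) (v : Int) =>
        let run := pvWalk sl v sl.length
        if 3 ≤ run.length then sequences ++ [run] else sequences)
      = (fun (sequences : List (List Int)) (v : Int) =>
        if (fun u => pvKeep (pvWalk sl u sl.length)) v then sequences ++ [(fun u => pvWalk sl u sl.length) v] else sequences) := by
    funext seqs v
    by_cases h3 : 3 ≤ (pvWalk sl v sl.length).length <;> simp [pvKeep, h3]
  rw [hfun, PySem.List.foldl_append_if, List.nil_append]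
  have hstarts : PySem.List.sorted (sl.filter (fun v => !(decide ((v-1) ∈ sl)))) (fun x => x) false
      = vals.filter (fun v => !(decide ((v-1) ∈ vals))) := by
    apply PySem.List.sorted_eq_of_perm_of_pairwise_lt
    · have h2 : vals.filter (fun v => !(decide ((v-1) ∈ vals)))
          = vals.filter (fun v => !(decide ((v-1) ∈ sl))) := by
        apply List.filter_congr
        intro x _
        simp [hmemv (x-1)]
      rw [h2]
      exact hperm.filter _
    · exact hpair.sublist List.filter_sublist
  rw [hstarts, pvChunks_heads vals hpair]
  have hmap : ∀ c ∈ pvChunks vals, pvWalk sl (c.headD 0) sl.length = c := by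
    intro c hc
    have hne : c ≠ [] := fun he => pvNoNil vals (he ▸ hc)
    have hchain := pvChunks_chain vals c hc
    have hsub : c ⊆ vals := fun x hx => pvMemChunks vals c hc hx
    have hpw : c.Pairwise (· < ·) := by
      refine List.isChain_iff_pairwise.mp (hchain.imp ?_)
      intro a b h; omega
    have hnd : c.Nodup := hpw.imp (fun h => ne_of_lt h)
    have hflen : c.length ≤ vals.length := (List.subperm_of_subset hnd hsub).length_le
    rw [pvWalk_congr sl vals (fun x => (hmemv x).symm) sl.length, hlen]
    exact pvWalk_run vals c hne hchain (fun x hx => hsub hx)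
      (pvChunks_max vals hpair c hc) vals.length hflen
  have h1 : List.map (fun u => pvWalk sl u (List.length sl)) (List.filter (fun u => pvKeep (pvWalk sl u (List.length sl))) (List.map (fun c => c.headD 0) (pvChunks vals)))
      = List.filter pvKeep (List.map (fun u => pvWalk sl u (List.length sl)) (List.map (fun c => c.headD 0) (pvChunks vals))) := by
    exact (List.filter_map (p := pvKeep) (f := fun u => pvWalk sl u (List.length sl))).symm
  rw [h1, List.map_map]
  have h2 : List.map ((fun u => pvWalk sl u (List.length sl)) ∘ fun c => c.headD 0) (pvChunks vals) = List.map id (pvChunks vals) :=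
    List.map_congr_left (fun c hc => hmap c hc)
  rw [h2, List.map_id]

-- ===== VERDICT (by name: the statement is the Claim_ definition above) =====
theorem get_straight_sequences_py_spec : Claim_equal_get_straight_sequences_py := by
  intro ranks _hdom hpre
  unfold Spec_get_straight_sequences_py
  rw [pvA_eq_chunks ranks hpre, pvB_eq_chunks ranks]
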